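-- pv_equiv track=rewrite | github.com/Society-for-AI-Collab-Studies-SACS/VaultNodes | kira-prime/src/validator.py | check_rotation
-- ===== SOURCE A (Python) =====
-- from collections import Counter
-- from typing import Dict, List, Optional, Tuple
--
-- def check_rotation(chapters: List[dict]) -> List[str]:
--     errors: List[str] = []
--     voices = [ch.get("narrator") for ch in chapters]
--     for a, b in zip(voices, voices[1:]):
--         if a == b:
--             errors.append("Narrator repetition detected (no back-to-back allowed)")
--             break
--     counts = Counter(voices)
--     for name in ["Limnus", "Garden", "Kira"]:
--         if counts[name] < 6:
--             errors.append(f"Narrator {name} appears fewer than 6 times ({counts[name]})")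
--     return errors
-- ===== SOURCE B (Python) =====
-- def check_rotation(chapters):
--     # Build a run-length encoding of the narrator sequence, then derive both
--     # checks from it: a back-to-back repetition exists iff some run is longer
--     # than 1, and each narrator's count is the sum of its run lengths.
--     runs = []
--     for ch in chapters:
--         v = ch.get("narrator")
--         if runs and runs[-1][0] == v:
--             runs[-1] = (v, runs[-1][1] + 1)
--         else:
--             runs.append((v, 1))
--     errors = []
--     if any(n > 1 for _, n in runs):
--         errors.append("Narrator repetition detected (no back-to-back allowed)")
--     for name in ["Limnus", "Garden", "Kira"]:
--         c = sum(n for w, n in runs if w == name)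
--         if c < 6:
--             errors.append(f"Narrator {name} appears fewer than 6 times ({c})")
--     return errors
-- ===== Notes on version B (the rewrite author's own statement) =====
-- stated objective: alternative
-- what changed: B builds a run-length encoding of the narrator sequence as an intermediate data structure and derives both checks from it: a repetition exists iff some run has length > 1, and each required narrator's count is the sum of its run lengths; A instead scans adjacent pairs with a break and uses a Counter.
import Mathlib
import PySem

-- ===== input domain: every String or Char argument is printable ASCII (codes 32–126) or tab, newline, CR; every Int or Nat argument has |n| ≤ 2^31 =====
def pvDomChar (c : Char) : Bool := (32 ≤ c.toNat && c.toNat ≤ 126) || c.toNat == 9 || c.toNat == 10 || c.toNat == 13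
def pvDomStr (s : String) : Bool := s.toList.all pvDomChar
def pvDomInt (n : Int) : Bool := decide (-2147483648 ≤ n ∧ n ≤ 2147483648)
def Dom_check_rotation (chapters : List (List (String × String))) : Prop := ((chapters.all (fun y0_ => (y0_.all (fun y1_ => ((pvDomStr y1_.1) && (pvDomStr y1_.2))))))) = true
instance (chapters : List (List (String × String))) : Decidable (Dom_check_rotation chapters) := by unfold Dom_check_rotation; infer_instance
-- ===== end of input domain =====

-- B builds a run-length encoding of the narrator sequence and derives both checks
-- from it (repetition iff some run longer than 1; counts = sums of run lengths),
-- instead of A's adjacent-pair scan with break plus Counter (alternative algorithm).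


-- ch.get("narrator")
def pvVoice (ch : List (String × String)) : Option String := (PySem.Dict.mk ch).get? "narrator"

def pvRepMsg : String := "Narrator repetition detected (no back-to-back allowed)"

def pvShortMsg (name : String) (c : Int) : String :=
  "Narrator " ++ name ++ " appears fewer than 6 times (" ++ PySem.Int.toStr c ++ ")"

-- ===== PORT A =====
-- the 'for a, b in zip(voices, voices[1:])' loop with its break
def pvRepScan : List (Option String) → List String
  | a :: b :: rest => if a == b then [pvRepMsg] else pvRepScan (b :: rest)
  | _ => []

def check_rotation (chapters : List (List (String × String))) : List String :=
  let voices := chapters.map pvVoice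
  let errors := pvRepScan voices
  let counts := PySem.Dict.counter voices
  ["Limnus", "Garden", "Kira"].foldl
    (fun errs name =>
      if counts.getD (some name) 0 < 6 then errs ++ [pvShortMsg name (counts.getD (some name) 0)]
      else errs)
    errors

-- ===== PORT B =====
-- the run-building loop: append a new run or bump the last run's length
def pvRLEstep (runs : List (Option String × Nat)) (v : Option String) : List (Option String × Nat) :=
  match runs.getLast? with
  | some (w, n) => if w == v then runs.dropLast ++ [(v, n + 1)] else runs ++ [(v, 1)]
  | none => [(v, 1)]

-- sum(n for w, n in runs if w == name)
def pvSumFor (name : Option String) : List (Option String × Nat) → Nat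
  | [] => 0
  | (w, n) :: rs => (if w == name then n else 0) + pvSumFor name rs

def check_rotation_alt (chapters : List (List (String × String))) : List String :=
  let runs := chapters.foldl (fun rs ch => pvRLEstep rs (pvVoice ch)) []
  let errors := if runs.any (fun p => decide (1 < p.2)) then [pvRepMsg] else []
  ["Limnus", "Garden", "Kira"].foldl
    (fun errs name =>
      let c : Int := pvSumFor (some name) runs
      if c < 6 then errs ++ [pvShortMsg name c] else errs)
    errors

-- ===== PRECONDITION & SPEC =====
def Spec_check_rotation (chapters : List (List (String × String))) (out : List String) : Prop := out = check_rotation_alt chapters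
instance (chapters : List (List (String × String))) (out : List String) : Decidable (Spec_check_rotation chapters out) := by unfold Spec_check_rotation; infer_instance

-- ===== CLAIM =====
def Claim_equal_check_rotation : Prop := ∀ (chapters : List (List (String × String))), Dom_check_rotation chapters → Spec_check_rotation chapters (check_rotation chapters)

-- ===== LEMMAS AND PROOFS =====

-- recursive run-length encoding continuing a pending run (w, n)
def pvRleP : Option String × Nat → List (Option String) → List (Option String × Nat)
  | (w, n), [] => [(w, n)]
  | (w, n), v :: vs => if w == v then pvRleP (v, n + 1) vs else (w, n) :: pvRleP (v, 1) vs

theorem pvFoldl_rleP (vs : List (Option String)) (rs : List (Option String × Nat))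
    (w : Option String) (n : Nat) :
    vs.foldl pvRLEstep (rs ++ [(w, n)]) = rs ++ pvRleP (w, n) vs := by
  induction vs generalizing rs w n with
  | nil => simp [pvRleP]
  | cons v vs ih =>
    simp only [List.foldl_cons, pvRLEstep, List.getLast?_concat, List.dropLast_concat, pvRleP]
    by_cases h : w = v
    · simp [h, ih]
    · have hb : (w == v) = false := beq_eq_false_iff_ne.mpr h
      simp only [hb, Bool.false_eq_true, if_false]
      rw [ih]
      simp

theorem pvRleP_big (vs : List (Option String)) (w : Option String) (n : Nat) (hn : 1 < n) :
    (pvRleP (w, n) vs).any (fun p => decide (1 < p.2)) = true := by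
  induction vs generalizing w n with
  | nil => simp [pvRleP]; omega
  | cons v vs ih =>
    simp only [pvRleP]
    split
    · exact ih v (n + 1) (by omega)
    · simp [hn]

theorem pvRleP_rep (vs : List (Option String)) (w : Option String) :
    (if (pvRleP (w, 1) vs).any (fun p => decide (1 < p.2)) then [pvRepMsg] else []) =
      pvRepScan (w :: vs) := by
  induction vs generalizing w with
  | nil => simp [pvRleP, pvRepScan]
  | cons v vs ih =>
    simp only [pvRleP, pvRepScan]
    by_cases h : w = v
    · have hb : (w == v) = true := by simp [h]
      simp [hb, pvRleP_big vs v 2 (by omega)]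
    · have hb : (w == v) = false := beq_eq_false_iff_ne.mpr h
      simp only [hb, Bool.false_eq_true, if_false, List.any_cons]
      simpa using ih v

theorem pvRleP_count (vs : List (Option String)) (name w : Option String) (n : Nat) :
    pvSumFor name (pvRleP (w, n) vs) =
      (if w == name then n else 0) + vs.count name := by
  induction vs generalizing w n with
  | nil => simp [pvRleP, pvSumFor]
  | cons v vs ih =>
    simp only [pvRleP]
    by_cases h : w = v
    · have hb : (w == v) = true := by simp [h]
      simp only [hb, if_true, ih v (n + 1), List.count_cons]
      subst h
      by_cases hn : w = name <;> simp [hn] <;> omega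
    · have hb : (w == v) = false := beq_eq_false_iff_ne.mpr h
      simp only [hb, Bool.false_eq_true, if_false, pvSumFor, ih v 1, List.count_cons]
      by_cases hn : v = name <;> simp [hn] <;> omega

-- the two derived facts, stated on the fold that B's port actually runs
theorem pvRuns_rep (chapters : List (List (String × String))) :
    (if (chapters.foldl (fun rs ch => pvRLEstep rs (pvVoice ch)) []).any
        (fun p => decide (1 < p.2)) then [pvRepMsg] else []) =
      pvRepScan (chapters.map pvVoice) := by
  cases chapters with
  | nil => simp [pvRepScan]
  | cons ch rest =>
    have hf : List.foldl (fun rs ch => pvRLEstep rs (pvVoice ch)) [] (ch :: rest) =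
        pvRleP (pvVoice ch, 1) (rest.map pvVoice) := by
      rw [List.foldl_cons, show pvRLEstep [] (pvVoice ch) = [(pvVoice ch, 1)] from rfl,
        ← List.foldl_map]
      simpa using pvFoldl_rleP (rest.map pvVoice) [] (pvVoice ch) 1
    rw [hf, List.map_cons]
    exact pvRleP_rep (rest.map pvVoice) (pvVoice ch)

theorem pvRuns_count (chapters : List (List (String × String))) (name : Option String) :
    pvSumFor name (chapters.foldl (fun rs ch => pvRLEstep rs (pvVoice ch)) []) =
      (chapters.map pvVoice).count name := by
  cases chapters with
  | nil => simp [pvSumFor]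
  | cons ch rest =>
    have hf : List.foldl (fun rs ch => pvRLEstep rs (pvVoice ch)) [] (ch :: rest) =
        pvRleP (pvVoice ch, 1) (rest.map pvVoice) := by
      rw [List.foldl_cons, show pvRLEstep [] (pvVoice ch) = [(pvVoice ch, 1)] from rfl,
        ← List.foldl_map]
      simpa using pvFoldl_rleP (rest.map pvVoice) [] (pvVoice ch) 1
    rw [hf, List.map_cons, pvRleP_count, List.count_cons]
    by_cases hn : pvVoice ch = name <;> simp [hn] <;> omega

-- ===== VERDICT =====
theorem check_rotation_spec : Claim_equal_check_rotation := by
  intro chapters _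
  unfold Spec_check_rotation
  simp [check_rotation, check_rotation_alt, List.foldl, PySem.Dict.getD_counter,
    pvRuns_count, pvRuns_rep]
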